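-- pv_equiv track=rewrite | github.com/xlniu/yonghuxingqujianmo | feature_engineering/text_feature.py | word_fre
-- ===== SOURCE A (Python) =====
-- from collections import Counter
--
-- def word_fre(x):
--     word_dict = []
--     x = x.split('&')
--     docs = []
--     for doc in x:
--         doc = doc.split()
--         docs.append(doc)
--         word_dict.extend(doc)
--     word_dict = Counter(word_dict)
--     new_word_dict = {}
--     for key,value in word_dict.items():
--         new_word_dict[key] = [value,0]
--     del word_dict
--     del x
--     for doc in docs:
--         doc = Counter(doc)
--         for word in doc.keys():
--             new_word_dict[word][1] += 1
--     return new_word_dict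
-- ===== SOURCE B (Python) =====
-- from collections import Counter
--
-- def word_fre(x):
--     res = {}
--     for doc in x.split('&'):
--         for word, c in Counter(doc.split()).items():
--             if word in res:
--                 res[word][0] += c
--                 res[word][1] += 1
--             else:
--                 res[word] = [c, 1]
--     return res
-- ===== Notes on version B (the rewrite author's own statement) =====
-- stated objective: simpler
-- what changed: B replaces A's three phases (flatten all docs into one list, build a global Counter into a [total,0] dict, then re-scan all per-doc Counters to fill in document frequencies) with a single pass that folds each per-doc Counter directly into the result dict, updating [total,df] incrementally; no flattened word list and no global Counter exist.
import Mathlib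
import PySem

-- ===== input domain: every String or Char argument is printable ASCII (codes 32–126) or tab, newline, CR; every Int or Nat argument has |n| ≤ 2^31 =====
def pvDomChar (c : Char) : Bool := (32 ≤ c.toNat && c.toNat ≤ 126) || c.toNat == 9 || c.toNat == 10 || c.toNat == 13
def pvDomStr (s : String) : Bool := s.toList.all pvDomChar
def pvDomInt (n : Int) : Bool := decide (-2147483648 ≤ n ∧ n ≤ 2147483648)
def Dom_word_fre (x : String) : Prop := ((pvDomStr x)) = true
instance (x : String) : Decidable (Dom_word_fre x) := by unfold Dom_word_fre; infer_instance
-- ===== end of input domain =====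

-- B folds each per-document Counter directly into one result dict in a single pass,
-- instead of A's flatten-all / global-Counter / second document-frequency pass.

-- ===== PORT A =====
def word_fre (x : String) : List (String × List Int) :=
  -- x.split('&'): the separator is the non-empty literal "&", so split? is always some
  let parts := (PySem.Str.split? x "&").getD []
  let st := parts.foldl
    (fun (st : List (List String) × List String) d =>
      let doc := PySem.Str.split₀ d
      (st.1 ++ [doc], st.2 ++ doc)) ([], [])
  let wordDict := PySem.Dict.counter st.2
  let newWordDict := wordDict.items.foldl
    (fun (nd : PySem.Dict String (List Int)) kv => nd.insert kv.1 [kv.2, 0])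
    PySem.Dict.empty
  -- new_word_dict[word][1] += 1 : the key is always present (every word of every doc was
  -- counted) and its value is a 2-element list, so modify + List.set is exact here
  let final := st.1.foldl
    (fun nd doc =>
      (PySem.Dict.counter doc).keys.foldl
        (fun nd w => nd.modify w [] (fun l => l.set 1 (l.getD 1 0 + 1))) nd)
    newWordDict
  final.items

-- ===== PORT B =====
def word_fre_alt (x : String) : List (String × List Int) :=
  (((PySem.Str.split? x "&").getD []).foldl
    (fun (res : PySem.Dict String (List Int)) d =>
      (PySem.Dict.counter (PySem.Str.split₀ d)).items.foldl
        -- the two in-place list mutations / the fresh [c,1] assignment: insert at an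
        -- existing key keeps its position, so both branches are one insert
        (fun res kv =>
          res.insert kv.1
            (if res.contains kv.1 then
              [(res.getD kv.1 []).getD 0 0 + kv.2, (res.getD kv.1 []).getD 1 0 + 1]
            else [kv.2, 1]))
        res)
    PySem.Dict.empty).items

-- ===== PRECONDITION & SPEC =====
def Spec_word_fre (x : String) (out : List (String × List Int)) : Prop := out = word_fre_alt x
instance (x : String) (out : List (String × List Int)) : Decidable (Spec_word_fre x out) := by unfold Spec_word_fre; infer_instance

-- ===== CLAIM (what is proved, stated in full; the proofs are below) =====
def Claim_equal_word_fre : Prop := ∀ (x : String), Dom_word_fre x → Spec_word_fre x (word_fre x)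

-- ===== LEMMAS AND PROOFS =====

-- the common value both programs compute: word ↦ [total count, number of docs containing it]
def pvSpec (D : List (List String)) : List (String × List Int) :=
  (PySem.Set.ofList D.flatten).map
    (fun w => (w, [(D.flatten.count w : Int), ((D.countP (fun d => decide (w ∈ d)) : Nat) : Int)]))

theorem int_list2_eq {a b c d : Int} (h1 : a = c) (h2 : b = d) : [a, b] = [c, d] := by
  rw [h1, h2]

theorem set_update_of_subset {α : Type} [BEq α] [LawfulBEq α] (s xs : List α)
    (h : ∀ x ∈ xs, x ∈ s) : PySem.Set.update s xs = s := by
  rw [PySem.Set.update_eq_append_filter]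
  have hf : List.filter (fun y => !PySem.Set.contains s y) (PySem.Set.ofList xs) = [] := by
    rw [List.filter_eq_nil_iff]
    intro a ha
    have hmem : a ∈ s := h a ((PySem.Set.mem_ofList xs a).1 ha)
    simp [hmem]
  rw [hf, List.append_nil]

theorem set_update_ofList {α : Type} [BEq α] [LawfulBEq α] (s xs : List α) :
    PySem.Set.update s (PySem.Set.ofList xs) = PySem.Set.update s xs := by
  rw [PySem.Set.update_eq_append_filter, PySem.Set.update_eq_append_filter,
    PySem.Set.ofList_ofList]

-- ===== A-side lemmas =====

-- phase 1 of A: a loop with two independent accumulators (docs, flattened word list)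
theorem stageA1 (parts : List String) (a : List (List String)) (b : List String) :
    parts.foldl
      (fun (st : List (List String) × List String) d =>
        (st.1 ++ [PySem.Str.split₀ d], st.2 ++ PySem.Str.split₀ d)) (a, b)
    = (a ++ parts.map PySem.Str.split₀, b ++ (parts.map PySem.Str.split₀).flatten) := by
  induction parts generalizing a b with
  | nil => simp
  | cons p ps ih => simp [ih, List.append_assoc]

-- phase 2 of A: building new_word_dict = {w : [total, 0]}
theorem stageA2 (W : List String) :
    ((PySem.Dict.counter W).items.foldl
      (fun (nd : PySem.Dict String (List Int)) kv => nd.insert kv.1 [kv.2, 0])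
      PySem.Dict.empty).items
    = (PySem.Set.ofList W).map (fun w => (w, [(W.count w : Int), 0])) := by
  rw [PySem.Dict.items_counter, List.foldl_map]
  rw [PySem.Dict.items_foldl_insert_fresh (PySem.Set.ofList W) (fun k => k)
    (fun k => [(W.count k : Int), 0]) PySem.Dict.empty
    (by intro a _; exact PySem.Dict.contains_empty a)
    (by simpa using PySem.Set.nodup_ofList W)]
  show PySem.Dict.empty.items ++ _ = _
  rw [show (PySem.Dict.empty : PySem.Dict String (List Int)).items = [] from rfl,
    List.nil_append]

-- one document of A's phase 3: getD after the modify loop over a Nodup key list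
theorem modFold_getD (ks : List String) (hnd : ks.Nodup)
    (d : PySem.Dict String (List Int)) (w : String) :
    (ks.foldl (fun nd k => nd.modify k [] (fun l => l.set 1 (l.getD 1 0 + 1))) d).getD w []
    = if w ∈ ks then (d.getD w []).set 1 ((d.getD w []).getD 1 0 + 1) else d.getD w [] := by
  induction ks generalizing d with
  | nil => simp
  | cons k ks ih =>
    simp only [List.foldl_cons]
    rw [ih (List.Nodup.of_cons hnd), PySem.Dict.getD_modify]
    by_cases hw : w = k
    · subst hw
      have hwks : w ∉ ks := (List.nodup_cons.mp hnd).1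
      simp [hwks]
    · simp [hw, List.mem_cons]

-- A's phase-3 loop leaves the key list unchanged (every word is already a key)
theorem outer_keys (D : List (List String)) (d : PySem.Dict String (List Int))
    (h : ∀ doc ∈ D, ∀ w ∈ doc, w ∈ d.keys) :
    (D.foldl
      (fun nd doc =>
        (PySem.Dict.counter doc).keys.foldl
          (fun nd w => nd.modify w [] (fun l => l.set 1 (l.getD 1 0 + 1))) nd)
      d).keys = d.keys := by
  induction D generalizing d with
  | nil => rfl
  | cons doc D ih =>
    simp only [List.foldl_cons]
    have hk : ((PySem.Dict.counter doc).keys.foldl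
        (fun nd w => nd.modify w [] (fun l => l.set 1 (l.getD 1 0 + 1))) d).keys = d.keys := by
      rw [PySem.Dict.keys_foldl_modify (PySem.Dict.counter doc).keys ([] : List Int)
          (fun _ _ (l : List Int) => l.set 1 (l.getD 1 0 + 1)) d,
        PySem.Dict.keys_counter, set_update_ofList, set_update_of_subset]
      intro w hw
      exact h doc (List.mem_cons_self) w hw
    rw [ih _ (by rw [hk]; intro doc' hd' w hw; exact h doc' (List.mem_cons_of_mem _ hd') w hw), hk]

-- A's phase-3 loop over all docs, tracked through getD
theorem outer_getD (D : List (List String)) (d : PySem.Dict String (List Int))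
    (w : String) (v c : Int) (h : d.getD w [] = [v, c]) :
    (D.foldl
      (fun nd doc =>
        (PySem.Dict.counter doc).keys.foldl
          (fun nd w => nd.modify w [] (fun l => l.set 1 (l.getD 1 0 + 1))) nd)
      d).getD w []
    = [v, c + ((D.countP (fun doc => decide (w ∈ doc)) : Nat) : Int)] := by
  induction D generalizing d c with
  | nil => simpa using h
  | cons doc D ih =>
    simp only [List.foldl_cons]
    have hnd : (PySem.Dict.counter doc).keys.Nodup := by
      rw [PySem.Dict.keys_counter]; exact PySem.Set.nodup_ofList doc
    have hmem : w ∈ (PySem.Dict.counter doc).keys ↔ w ∈ doc := by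
      rw [PySem.Dict.keys_counter]; exact PySem.Set.mem_ofList doc w
    by_cases hw : w ∈ doc
    · have h1 : ((PySem.Dict.counter doc).keys.foldl
          (fun nd w => nd.modify w [] (fun l => l.set 1 (l.getD 1 0 + 1))) d).getD w []
          = [v, c + 1] := by
        rw [modFold_getD _ hnd, if_pos (hmem.2 hw), h]; rfl
      rw [ih _ (c + 1) h1]
      have hcp : (List.countP (fun doc => decide (w ∈ doc)) (doc :: D))
          = List.countP (fun doc => decide (w ∈ doc)) D + 1 := by
        rw [List.countP_cons]; simp [hw]
      rw [hcp]
      exact int_list2_eq rfl (by push_cast <;> ring)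
    · have h1 : ((PySem.Dict.counter doc).keys.foldl
          (fun nd w => nd.modify w [] (fun l => l.set 1 (l.getD 1 0 + 1))) d).getD w []
          = [v, c] := by
        rw [modFold_getD _ hnd, if_neg (fun hc => hw (hmem.1 hc)), h]
      rw [ih _ c h1]
      have hcp : (List.countP (fun doc => decide (w ∈ doc)) (doc :: D))
          = List.countP (fun doc => decide (w ∈ doc)) D := by
        rw [List.countP_cons]; simp [hw]
      rw [hcp]

-- A's phases 2+3 compute pvSpec
theorem A_pipeline (D : List (List String)) :
    (D.foldl
      (fun nd doc =>
        (PySem.Dict.counter doc).keys.foldl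
          (fun nd w => nd.modify w [] (fun l => l.set 1 (l.getD 1 0 + 1))) nd)
      ((PySem.Dict.counter D.flatten).items.foldl
        (fun (nd : PySem.Dict String (List Int)) kv => nd.insert kv.1 [kv.2, 0])
        PySem.Dict.empty)).items = pvSpec D := by
  set W := D.flatten with hW
  set nwd := (PySem.Dict.counter W).items.foldl
    (fun (nd : PySem.Dict String (List Int)) kv => nd.insert kv.1 [kv.2, 0])
    PySem.Dict.empty with hnwd
  have hitems : nwd.items = (PySem.Set.ofList W).map (fun w => (w, [(W.count w : Int), 0])) :=
    stageA2 W
  have hkeys : nwd.keys = PySem.Set.ofList W := by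
    show nwd.items.map (fun p => p.1) = _
    rw [hitems, List.map_map]
    exact List.map_id _
  have hknd : nwd.keys.Nodup := by rw [hkeys]; exact PySem.Set.nodup_ofList W
  have hgetD : ∀ w ∈ W, nwd.getD w [] = [(W.count w : Int), 0] := by
    intro w hw
    exact PySem.Dict.getD_of_mem_items nwd
      (by rw [hitems]; exact List.mem_map.2 ⟨w, (PySem.Set.mem_ofList W w).2 hw, rfl⟩) hknd []
  have hsub : ∀ doc ∈ D, ∀ w ∈ doc, w ∈ nwd.keys := by
    intro doc hd w hw
    rw [hkeys]
    exact (PySem.Set.mem_ofList W w).2 (List.mem_flatten.2 ⟨doc, hd, hw⟩)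
  set final := D.foldl
    (fun nd doc =>
      (PySem.Dict.counter doc).keys.foldl
        (fun nd w => nd.modify w [] (fun l => l.set 1 (l.getD 1 0 + 1))) nd)
    nwd with hfinal
  have hfkeys : final.keys = PySem.Set.ofList W := by
    rw [hfinal, outer_keys D nwd hsub, hkeys]
  have hfnd : final.keys.Nodup := by rw [hfkeys]; exact PySem.Set.nodup_ofList W
  rw [PySem.Dict.items_eq_map_keys final hfnd [], hfkeys]
  apply List.map_congr_left
  intro w hw
  have hwW : w ∈ W := (PySem.Set.mem_ofList W w).1 hw
  have hout := outer_getD D nwd w (W.count w : Int) 0 (hgetD w hwW)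
  rw [hfinal, hout]
  simp [hW]

-- ===== B-side lemmas =====

-- one document of B: getD after merging a (key, count) list with distinct keys
theorem B_inner_getD (ks : List String) (hnd : ks.Nodup) (c : String → Int)
    (d : PySem.Dict String (List Int)) (w : String) :
    ((ks.map (fun k => (k, c k))).foldl
      (fun (res : PySem.Dict String (List Int)) kv =>
        res.insert kv.1
          (if res.contains kv.1 then
            [(res.getD kv.1 []).getD 0 0 + kv.2, (res.getD kv.1 []).getD 1 0 + 1]
          else [kv.2, 1])) d).getD w []
    = if w ∈ ks then
        (if d.contains w then
          [(d.getD w []).getD 0 0 + c w, (d.getD w []).getD 1 0 + 1]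
        else [c w, 1])
      else d.getD w [] := by
  rw [List.foldl_map]
  induction ks generalizing d with
  | nil => simp
  | cons k ks ih =>
    simp only [List.foldl_cons]
    rw [ih (List.Nodup.of_cons hnd)]
    by_cases hw : w = k
    · subst hw
      have hwks : w ∉ ks := (List.nodup_cons.mp hnd).1
      rw [if_neg hwks, if_pos (List.mem_cons_self), PySem.Dict.getD_insert_self]
    · have hc : ∀ v : List Int, (d.insert k v).contains w = d.contains w := by
        intro v
        rw [PySem.Dict.contains_insert]
        simp [hw]
      rw [PySem.Dict.getD_insert_of_ne _ _ _ hw]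
      simp only [hc]
      simp [List.mem_cons, hw]

-- one document of B: merging Counter(doc) into a dict holding pvSpec D
theorem B_step (D : List (List String)) (doc : List String)
    (d : PySem.Dict String (List Int)) (hd : d.items = pvSpec D) :
    ((PySem.Dict.counter doc).items.foldl
      (fun (res : PySem.Dict String (List Int)) kv =>
        res.insert kv.1
          (if res.contains kv.1 then
            [(res.getD kv.1 []).getD 0 0 + kv.2, (res.getD kv.1 []).getD 1 0 + 1]
          else [kv.2, 1])) d).items = pvSpec (D ++ [doc]) := by
  have hkeys : d.keys = PySem.Set.ofList D.flatten := by
    show d.items.map (fun p => p.1) = _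
    rw [hd]
    unfold pvSpec
    rw [List.map_map]
    exact List.map_id _
  have hknd : d.keys.Nodup := by rw [hkeys]; exact PySem.Set.nodup_ofList _
  have hcont : ∀ w, d.contains w = decide (w ∈ D.flatten) := by
    intro w
    rw [PySem.Dict.contains_eq_decide_mem_keys, hkeys]
    simp [PySem.Set.mem_ofList]
  have hget : ∀ w ∈ D.flatten, d.getD w []
      = [(D.flatten.count w : Int), ((D.countP (fun d' => decide (w ∈ d')) : Nat) : Int)] := by
    intro w hw
    exact PySem.Dict.getD_of_mem_items d
      (by rw [hd]; exact List.mem_map.2 ⟨w, (PySem.Set.mem_ofList _ w).2 hw, rfl⟩) hknd []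
  have hflat : (D ++ [doc]).flatten = D.flatten ++ doc := by simp
  set r := ((PySem.Dict.counter doc).items.foldl
      (fun (res : PySem.Dict String (List Int)) kv =>
        res.insert kv.1
          (if res.contains kv.1 then
            [(res.getD kv.1 []).getD 0 0 + kv.2, (res.getD kv.1 []).getD 1 0 + 1]
          else [kv.2, 1])) d) with hr
  have hrkeys : r.keys = PySem.Set.ofList (D ++ [doc]).flatten := by
    rw [hr, PySem.Dict.items_counter,
      PySem.Dict.keys_foldl_insert_key (List.map (fun k => (k, (doc.count k : Int)))
          (PySem.Set.ofList doc)) (fun (kv : String × Int) => kv.1)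
        (fun (res : PySem.Dict String (List Int)) (kv : String × Int) =>
          (if res.contains kv.1 then
            [(res.getD kv.1 []).getD 0 0 + kv.2, (res.getD kv.1 []).getD 1 0 + 1]
          else [kv.2, 1])) d,
      List.map_map]
    rw [hflat, PySem.Set.ofList_append, hkeys]
    have hm : (List.map ((fun (kv : String × Int) => kv.1) ∘ fun k => (k, (doc.count k : Int)))
        (PySem.Set.ofList doc)) = PySem.Set.ofList doc := List.map_id _
    rw [hm, set_update_ofList]
  have hrnd : r.keys.Nodup := by rw [hrkeys]; exact PySem.Set.nodup_ofList _
  have hrget : ∀ w ∈ (D ++ [doc]).flatten, r.getD w []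
      = [((D ++ [doc]).flatten.count w : Int),
         (((D ++ [doc]).countP (fun d' => decide (w ∈ d')) : Nat) : Int)] := by
    intro w hwm
    have hB := B_inner_getD (PySem.Set.ofList doc) (PySem.Set.nodup_ofList doc)
      (fun k => (doc.count k : Int)) d w
    rw [hr, PySem.Dict.items_counter, hB]
    have hcp1 : List.countP (fun d' => decide (w ∈ d')) [doc]
        = (if w ∈ doc then 1 else 0) := by simp [List.countP_cons]
    by_cases hwdoc : w ∈ doc
    · rw [if_pos ((PySem.Set.mem_ofList doc w).2 hwdoc)]
      by_cases hwD : w ∈ D.flatten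
      · rw [hcont w, if_pos (by simpa using hwD), hget w hwD, hflat,
          List.count_append, List.countP_append, hcp1, if_pos hwdoc]
        simp only [List.getD_cons_zero, List.getD_cons_succ]
        exact int_list2_eq (by push_cast <;> ring) (by push_cast <;> ring)
      · rw [hcont w, if_neg (by simpa using hwD)]
        have hc0 : D.flatten.count w = 0 := List.count_eq_zero.2 hwD
        have hp0 : D.countP (fun d' => decide (w ∈ d')) = 0 := by
          rw [List.countP_eq_zero]
          intro d' hd'
          simp only [decide_eq_true_eq]
          exact fun hwd' => hwD (List.mem_flatten.2 ⟨d', hd', hwd'⟩)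
        rw [hflat, List.count_append, List.countP_append, hcp1, if_pos hwdoc, hc0, hp0]
        exact int_list2_eq (by push_cast <;> ring) (by push_cast <;> ring)
    · rw [if_neg (fun hc => hwdoc ((PySem.Set.mem_ofList doc w).1 hc))]
      have hwD : w ∈ D.flatten := by
        rw [hflat] at hwm
        rcases List.mem_append.1 hwm with h | h
        · exact h
        · exact absurd h hwdoc
      have hc0 : doc.count w = 0 := List.count_eq_zero.2 hwdoc
      rw [hget w hwD, hflat, List.count_append, List.countP_append, hcp1, if_neg hwdoc, hc0]
      exact int_list2_eq (by push_cast <;> ring) (by push_cast <;> ring)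
  rw [PySem.Dict.items_eq_map_keys r hrnd [], hrkeys]
  unfold pvSpec
  apply List.map_congr_left
  intro w hw
  rw [hrget w ((PySem.Set.mem_ofList _ w).1 hw)]

theorem B_main (D : List (List String)) :
    (D.foldl
      (fun (res : PySem.Dict String (List Int)) doc =>
        (PySem.Dict.counter doc).items.foldl
          (fun (res : PySem.Dict String (List Int)) kv =>
            res.insert kv.1
              (if res.contains kv.1 then
                [(res.getD kv.1 []).getD 0 0 + kv.2, (res.getD kv.1 []).getD 1 0 + 1]
              else [kv.2, 1])) res)
      PySem.Dict.empty).items = pvSpec D := by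
  induction D using List.reverseRecOn with
  | nil =>
    show (PySem.Dict.empty : PySem.Dict String (List Int)).items = pvSpec []
    rfl
  | append_singleton D doc ih =>
    rw [List.foldl_append]
    simp only [List.foldl_cons, List.foldl_nil]
    exact B_step D doc _ ih

theorem word_fre_eq_pvSpec (x : String) :
    word_fre x = pvSpec (((PySem.Str.split? x "&").getD []).map PySem.Str.split₀) := by
  simp only [word_fre]
  rw [stageA1]
  simp only [List.nil_append]
  exact A_pipeline _

theorem word_fre_alt_eq_pvSpec (x : String) :
    word_fre_alt x = pvSpec (((PySem.Str.split? x "&").getD []).map PySem.Str.split₀) := by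
  have h := B_main (((PySem.Str.split? x "&").getD []).map PySem.Str.split₀)
  rw [List.foldl_map] at h
  exact h

-- ===== VERDICT (by name: the statement is the Claim_ definition above) =====
theorem word_fre_spec : Claim_equal_word_fre := by
  intro x _
  unfold Spec_word_fre
  rw [word_fre_eq_pvSpec, word_fre_alt_eq_pvSpec]
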